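-- pv_equiv track=rewrite | github.com/PabloLHo/LogAnalyzer | parseador.py | definirPerfiles
-- ===== SOURCE A (Python) =====
-- def definirPerfiles(cadena):
--
--     perfiles = dict()
--
--     for linea in cadena.split("\n"):
--         ip = linea.split(' - ')[0]
--         if ip not in perfiles.keys():
--             perfiles[ip] = {'entradas': list()}
--         perfiles[ip]['entradas'].append(linea[(len(ip) + 1):])
--
--     return perfiles
-- ===== SOURCE B (Python) =====
-- def definirPerfiles(cadena):
--     # Two-phase pipeline: extract (ip, rest) pairs, dedup ips in first-seen
--     # order, then build each group by filtering the pair list.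
--     pares = []
--     for linea in cadena.split("\n"):
--         ip = linea.split(' - ')[0]
--         pares.append((ip, linea[len(ip) + 1:]))
--     ips = list(dict.fromkeys(ip for ip, _ in pares))
--     return {ip: {'entradas': [r for i, r in pares if i == ip]} for ip in ips}
-- ===== Notes on version B (the rewrite author's own statement) =====
-- stated objective: alternative
-- what changed: B replaces A's incremental nested-dict accumulation (first-seen insert + in-place append per line) with a two-phase pipeline: extract all (ip, rest) pairs, dedup the ips in first-seen order, then build each profile's entries by filtering the pair list.
import Mathlib
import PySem

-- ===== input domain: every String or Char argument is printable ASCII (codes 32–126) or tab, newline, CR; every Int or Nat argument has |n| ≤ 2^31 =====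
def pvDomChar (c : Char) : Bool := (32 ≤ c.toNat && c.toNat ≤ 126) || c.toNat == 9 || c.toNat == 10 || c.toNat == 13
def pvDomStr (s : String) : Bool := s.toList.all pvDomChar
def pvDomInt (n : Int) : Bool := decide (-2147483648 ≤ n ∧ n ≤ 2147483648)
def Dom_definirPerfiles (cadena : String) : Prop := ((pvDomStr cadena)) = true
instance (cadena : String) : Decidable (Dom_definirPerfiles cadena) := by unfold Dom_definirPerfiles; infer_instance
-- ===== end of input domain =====

-- B replaces A's incremental nested-dict accumulation by a two-phase pipeline
-- (extract (ip, rest) pairs, dedup ips in first-seen order, group by filtering);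
-- same result, alternative decomposition (not claimed faster).

-- ===== PORT A =====
def definirPerfiles (cadena : String) : List (String × List (String × List String)) :=
  let perfiles : PySem.Dict String (PySem.Dict String (List String)) :=
    ((PySem.Str.split? cadena "\n").getD []).foldl (fun perfiles linea =>
      -- ip = linea.split(' - ')[0]  (sep ≠ "" so split? is some; split never empty, [0] safe)
      let ip := PySem.List.pyGetD ((PySem.Str.split? linea " - ").getD []) 0 ""
      -- if ip not in perfiles.keys(): perfiles[ip] = {'entradas': list()}
      let perfiles := if perfiles.contains ip then perfiles
        else perfiles.insert ip (PySem.Dict.mk [("entradas", ([] : List String))])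
      -- perfiles[ip]['entradas'].append(linea[(len(ip) + 1):])  (ip present, so get? is some)
      match perfiles.get? ip with
      | some inner => perfiles.insert ip (inner.modify "entradas" []
          (fun l => l ++ [PySem.Str.slice linea (some ((PySem.Str.len ip : Int) + 1)) none]))
      | none => perfiles)
      PySem.Dict.empty
  perfiles.items.map (fun p => (p.1, p.2.items))

-- ===== PORT B =====
def definirPerfiles_alt (cadena : String) : List (String × List (String × List String)) :=
  let pares := ((PySem.Str.split? cadena "\n").getD []).map (fun linea =>
    let ip := PySem.List.pyGetD ((PySem.Str.split? linea " - ").getD []) 0 ""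
    (ip, PySem.Str.slice linea (some ((PySem.Str.len ip : Int) + 1)) none))
  let ips := PySem.List.dedup (pares.map (·.1))
  ips.map (fun ip => (ip, [("entradas", (pares.filter (fun p => p.1 == ip)).map (·.2))]))

-- ===== PRECONDITION & SPEC =====
def Spec_definirPerfiles (cadena : String) (out : List (String × List (String × List String))) : Prop := out = definirPerfiles_alt cadena
instance (cadena : String) (out : List (String × List (String × List String))) : Decidable (Spec_definirPerfiles cadena out) := by unfold Spec_definirPerfiles; infer_instance

-- ===== CLAIM (what is proved, stated in full; the proofs are below) =====
def Claim_equal_definirPerfiles : Prop := ∀ (cadena : String), Dom_definirPerfiles cadena → Spec_definirPerfiles cadena (definirPerfiles cadena)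

-- ===== LEMMAS AND PROOFS =====

-- (ip, rest) extracted from one line, exactly as both ports compute them
def pvLine (linea : String) : String × String :=
  let ip := PySem.List.pyGetD ((PySem.Str.split? linea " - ").getD []) 0 ""
  (ip, PySem.Str.slice linea (some ((PySem.Str.len ip : Int) + 1)) none)

-- A's loop body, over an already-extracted (ip, rest) pair
def pvEnsure (d : PySem.Dict String (PySem.Dict String (List String))) (ip : String) :
    PySem.Dict String (PySem.Dict String (List String)) :=
  if d.contains ip then d
  else d.insert ip (PySem.Dict.mk [("entradas", ([] : List String))])

def pvStep (d : PySem.Dict String (PySem.Dict String (List String))) (p : String × String) :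
    PySem.Dict String (PySem.Dict String (List String)) :=
  match (pvEnsure d p.1).get? p.1 with
  | some inner => (pvEnsure d p.1).insert p.1 (inner.modify "entradas" [] (fun l => l ++ [p.2]))
  | none => pvEnsure d p.1

def pvWrapInner (v : List String) : PySem.Dict String (List String) :=
  PySem.Dict.mk [("entradas", v)]

def pvWrapD (e : PySem.Dict String (List String)) :
    PySem.Dict String (PySem.Dict String (List String)) :=
  PySem.Dict.mk (e.items.map (fun p => (p.1, pvWrapInner p.2)))

theorem pv_contains_wrap (e : PySem.Dict String (List String)) (k : String) :
    (pvWrapD e).contains k = e.contains k := by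
  simp [pvWrapD, PySem.Dict.contains, List.any_map, Function.comp_def]

theorem pv_get?_wrap (e : PySem.Dict String (List String)) (k : String) :
    (pvWrapD e).get? k = (e.get? k).map pvWrapInner := by
  simp [pvWrapD, PySem.Dict.get?, List.find?_map, Function.comp_def, Option.map_map]

theorem pv_insert_wrap (e : PySem.Dict String (List String)) (k : String) (v : List String) :
    (pvWrapD e).insert k (pvWrapInner v) = pvWrapD (e.insert k v) := by
  simp only [PySem.Dict.insert, pv_contains_wrap]
  split
  · simp only [pvWrapD, List.map_map]
    congr 1
    apply List.map_congr_left
    intro p _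
    by_cases h : p.1 = k <;> simp [h]
  · simp [pvWrapD]

theorem pv_modify_wrapInner (v : List String) (r : String) :
    (pvWrapInner v).modify "entradas" [] (fun l => l ++ [r]) = pvWrapInner (v ++ [r]) := by
  simp [pvWrapInner, PySem.Dict.modify, PySem.Dict.insert, PySem.Dict.getD,
    PySem.Dict.get?, PySem.Dict.contains]

theorem pv_step_wrap (e : PySem.Dict String (List String)) (p : String × String) :
    pvStep (pvWrapD e) p = pvWrapD (e.modify p.1 [] (fun l => l ++ [p.2])) := by
  unfold pvStep
  by_cases h : e.contains p.1 = true
  · have he : pvEnsure (pvWrapD e) p.1 = pvWrapD e := by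
      unfold pvEnsure; rw [pv_contains_wrap, if_pos h]
    rw [he]
    cases hg : e.get? p.1 with
    | none =>
      rw [PySem.Dict.get?_eq_none_iff_contains] at hg
      rw [h] at hg; exact absurd hg (by simp)
    | some v =>
      rw [pv_get?_wrap, hg]
      simp only [Option.map_some]
      rw [pv_modify_wrapInner, pv_insert_wrap]
      congr 1
      rw [PySem.Dict.modify]
      have hv : e.getD p.1 [] = v := by
        rw [PySem.Dict.getD_eq_get?_getD, hg]; rfl
      rw [hv]
  · have he : pvEnsure (pvWrapD e) p.1 = pvWrapD (e.insert p.1 []) := by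
      unfold pvEnsure
      rw [pv_contains_wrap, if_neg h]
      exact pv_insert_wrap e p.1 []
    rw [he, pv_get?_wrap, PySem.Dict.get?_insert]
    simp only [if_true, Option.map_some]
    rw [pv_modify_wrapInner, pv_insert_wrap, PySem.Dict.insert_insert_self]
    congr 1
    rw [PySem.Dict.modify]
    have hg : e.get? p.1 = none := by
      rw [PySem.Dict.get?_eq_none_iff_contains]; simpa using h
    have hv : e.getD p.1 [] = [] := by
      rw [PySem.Dict.getD_eq_get?_getD, hg]; rfl
    rw [hv]

theorem pv_foldl_wrap (ps : List (String × String)) (e : PySem.Dict String (List String)) :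
    ps.foldl pvStep (pvWrapD e)
      = pvWrapD (ps.foldl (fun d p => d.modify p.1 [] (fun l => l ++ [p.2])) e) := by
  induction ps generalizing e with
  | nil => rfl
  | cons p ps ih =>
    simp only [List.foldl_cons, pv_step_wrap]
    exact ih _

-- ===== VERDICT (by name: the statement is the Claim_ definition above) =====
theorem definirPerfiles_spec : Claim_equal_definirPerfiles := by
  intro cadena _
  unfold Spec_definirPerfiles definirPerfiles definirPerfiles_alt
  set ls := (PySem.Str.split? cadena "\n").getD [] with hls
  have hfold :
      ls.foldl (fun perfiles linea =>
        let ip := PySem.List.pyGetD ((PySem.Str.split? linea " - ").getD []) 0 ""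
        let perfiles := if perfiles.contains ip then perfiles
          else perfiles.insert ip (PySem.Dict.mk [("entradas", ([] : List String))])
        match perfiles.get? ip with
        | some inner => perfiles.insert ip (inner.modify "entradas" []
            (fun l => l ++ [PySem.Str.slice linea (some ((PySem.Str.len ip : Int) + 1)) none]))
        | none => perfiles) PySem.Dict.empty
        = (ls.map pvLine).foldl pvStep PySem.Dict.empty := by
    rw [List.foldl_map]
    rfl
  rw [hfold]
  have hempty : (PySem.Dict.empty : PySem.Dict String (PySem.Dict String (List String)))
      = pvWrapD PySem.Dict.empty := rfl
  rw [hempty, pv_foldl_wrap]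
  set ps := ls.map pvLine with hps
  set P := ps.foldl (fun d p => d.modify p.1 [] (fun l => l ++ [p.2])) PySem.Dict.empty with hP
  have hnodup : P.keys.Nodup := by
    rw [hP]
    exact PySem.Dict.nodup_keys_foldl_modify_key ps Prod.fst []
      (fun _ p => fun l => l ++ [p.2]) PySem.Dict.empty (by simp [PySem.Dict.empty, PySem.Dict.keys])
  have hkeys : P.keys = PySem.List.dedup (ps.map (·.1)) := by
    rw [hP]
    rw [PySem.Dict.keys_foldl_modify_key ps Prod.fst [] (fun _ p => fun l => l ++ [p.2])]
    simp [PySem.Dict.empty, PySem.Dict.keys, PySem.Set.update, PySem.Set.ofList]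
  have hitems := PySem.Dict.items_eq_map_keys P hnodup []
  -- items of the wrapped dict, flattened back to association lists
  have hmap : (pvWrapD P).items.map (fun p => (p.1, p.2.items))
      = P.items.map (fun p => (p.1, [("entradas", p.2)])) := by
    simp [pvWrapD, List.map_map, Function.comp_def, pvWrapInner]
  rw [hmap, hitems, hkeys, List.map_map]
  apply List.map_congr_left
  intro ip _
  simp only [Function.comp_def]
  congr 2
  rw [hP, PySem.Dict.getD_foldl_modify_append]
  simp only [PySem.Dict.getD_empty, List.nil_append]
  rfl
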